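-- pv_equiv track=rewrite | github.com/2bogo/bioinformatics-algorithms-rosalind | Chapter_1/BA1H.py | mainFunc
-- ===== SOURCE A (Python) =====
-- def findAllPattern(string, k_len):
--     dic = {}
--     for i in range(len(string) - k_len + 1):
--         pattern = string[i : i + k_len]
--         val = dic.get(pattern, [])
--         val.append(i)
--         dic[pattern] = val
--     return dic
--
-- def hammingDistance(p, q):
--     return [True if i == j else False for i, j in zip(p, q)].count(False)
--
-- def mainFunc(pattern, string, d):
--     dic_all_pattern = findAllPattern(string, len(pattern))
--     result = sorted(
--         sum(
--             [
--                 val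
--                 for key, val in dic_all_pattern.items()
--                 if hammingDistance(key, pattern) <= d
--             ],
--             [],
--         )
--     )
--
--     return " ".join(list(map(str, result)))
-- ===== SOURCE B (Python) =====
-- def mainFunc(pattern, string, d):
--     k = len(pattern)
--     out = []
--     for i in range(len(string) - k + 1):
--         mism = 0
--         for a, b in zip(string[i:i + k], pattern):
--             if a != b:
--                 mism += 1
--         if mism <= d:
--             out.append(str(i))
--     return " ".join(out)
-- ===== Notes on version B (the rewrite author's own statement) =====
-- stated objective: simpler
-- what changed: Replaced A's pipeline (group all k-mers into a position dict, filter its items by Hamming distance, flatten the groups, sort, then stringify) by a single left-to-right scan that counts mismatches per window and appends matching indices, which are already in ascending order, so the dict, the flatten and the sort all disappear.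
import Mathlib
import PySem

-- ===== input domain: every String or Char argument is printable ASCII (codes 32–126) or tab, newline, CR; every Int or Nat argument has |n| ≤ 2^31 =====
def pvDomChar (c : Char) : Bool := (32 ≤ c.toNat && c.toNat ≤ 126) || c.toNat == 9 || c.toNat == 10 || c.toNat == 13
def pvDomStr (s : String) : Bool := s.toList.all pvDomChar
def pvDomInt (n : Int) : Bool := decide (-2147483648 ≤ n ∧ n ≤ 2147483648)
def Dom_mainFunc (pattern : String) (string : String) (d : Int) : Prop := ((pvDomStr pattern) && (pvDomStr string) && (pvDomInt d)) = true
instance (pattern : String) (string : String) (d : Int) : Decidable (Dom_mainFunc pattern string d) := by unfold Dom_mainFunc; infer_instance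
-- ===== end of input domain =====

-- B replaces A's build-dict / filter-items / flatten / sort pipeline by one direct scan
-- that appends each matching index in order (objective: simpler — no grouping dict, no sort).

-- ===== PORT A =====
-- hammingDistance: [True if i == j else False for i, j in zip(p, q)].count(False)
def hammingDistance (p : String) (q : String) : Int :=
  (((p.toList.zip q.toList).map (fun ij => if ij.1 == ij.2 then true else false)).count false : Int)

-- findAllPattern: dict from k-mer to its list of start positions (dic[pattern] = dic.get(pattern, []) + [i])
def findAllPattern (string : String) (k_len : Int) : PySem.Dict String (List Int) :=
  (PySem.List.pyRange 0 (PySem.Str.len string - k_len + 1) 1).foldl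
    (fun dic i => dic.modify (PySem.Str.slice string (some i) (some (i + k_len))) [] (fun val => val ++ [i]))
    PySem.Dict.empty

def mainFunc (pattern : String) (string : String) (d : Int) : String :=
  PySem.Str.join " "
    ((PySem.List.sorted
      ((((findAllPattern string (PySem.Str.len pattern)).items.filter
            (fun kv => decide (hammingDistance kv.1 pattern ≤ d))).map
          (fun kv => kv.2)).foldl (fun acc x => acc ++ x) ([] : List Int))
      (fun x => x) false).map PySem.Int.toStr)

-- ===== PORT B =====
-- count of mismatching aligned characters, accumulated in one pass (B's inner loop)
def mismatchCount (window : String) (pattern : String) : Int :=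
  (window.toList.zip pattern.toList).foldl
    (fun m ab => if ab.1 != ab.2 then m + 1 else m) 0

def mainFunc_alt (pattern : String) (string : String) (d : Int) : String :=
  PySem.Str.join " "
    ((PySem.List.pyRange 0 (PySem.Str.len string - (PySem.Str.len pattern) + 1) 1).foldl
      (fun acc i =>
        if mismatchCount (PySem.Str.slice string (some i) (some (i + PySem.Str.len pattern))) pattern ≤ d
        then acc ++ [PySem.Int.toStr i] else acc) [])

-- ===== PRECONDITION & SPEC =====
def Spec_mainFunc (pattern : String) (string : String) (d : Int) (out : String) : Prop := out = mainFunc_alt pattern string d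
instance (pattern : String) (string : String) (d : Int) (out : String) : Decidable (Spec_mainFunc pattern string d out) := by unfold Spec_mainFunc; infer_instance

-- ===== CLAIM (what is proved, stated in full; the proofs are below) =====
def Claim_equal_mainFunc : Prop := ∀ (pattern : String) (string : String) (d : Int), Dom_mainFunc pattern string d → Spec_mainFunc pattern string d (mainFunc pattern string d)

-- ===== LEMMAS AND PROOFS =====

-- A's hamming distance and B's mismatch counter agree.
lemma ham_eq_mism (p q : String) : hammingDistance p q = mismatchCount p q := by
  unfold hammingDistance mismatchCount
  have h := PySem.List.foldl_if_add_one (fun ab : Char × Char => ab.1 != ab.2)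
    (p.toList.zip q.toList) 0
  rw [h, zero_add]
  simp only [List.count_eq_countP, List.countP_map]
  congr 1
  apply List.countP_congr
  intro ab _
  by_cases hab : ab.1 = ab.2 <;> simp [hab, bne]

lemma flatMap_congr_mem {κ α : Type} {l : List κ} {f g : κ → List α}
    (h : ∀ c ∈ l, f c = g c) : l.flatMap f = l.flatMap g := by
  induction l with
  | nil => rfl
  | cons c t ih =>
    simp only [List.flatMap_cons]
    rw [h c (List.mem_cons_self), ih (fun c' hc' => h c' (List.mem_cons_of_mem _ hc'))]

-- flattening the per-key groups of a list, over a duplicate-free key list covering it,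
-- is a permutation of the list itself
lemma flatMap_groups_perm {κ α : Type} [BEq κ] [LawfulBEq κ]
    (L : List κ) (key : α → κ) :
    ∀ (R : List α), L.Nodup → (∀ i ∈ R, key i ∈ L) →
      (L.flatMap (fun c => R.filter (fun i => key i == c))).Perm R := by
  induction L with
  | nil =>
    intro R _ hcov
    have : R = [] := by
      cases R with
      | nil => rfl
      | cons x t => exact absurd (hcov x (List.mem_cons_self)) (by simp)
    simp [this]
  | cons c L' ih =>
    intro R hnd hcov
    simp only [List.flatMap_cons]
    have hrw : L'.flatMap (fun c' => R.filter (fun i => key i == c')) =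
        L'.flatMap (fun c' => (R.filter (fun i => !(key i == c))).filter (fun i => key i == c')) := by
      apply flatMap_congr_mem
      intro c' hc'
      rw [List.filter_filter]
      apply List.filter_congr
      intro i _
      by_cases h : key i = c'
      · have : c' ≠ c := fun he => (List.nodup_cons.mp hnd).1 (he ▸ hc')
        simp [h, this]
      · simp [h]
    rw [hrw]
    have hperm := ih (R.filter (fun i => !(key i == c))) (List.nodup_cons.mp hnd).2
      (by
        intro i hi
        have hmem := List.mem_of_mem_filter hi
        have hne : ¬ (key i == c) = true := by
          have := List.of_mem_filter hi; simpa using this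
        have := hcov i hmem
        rcases List.mem_cons.mp this with h | h
        · exact absurd (by simp [h]) hne
        · exact h)
    exact (List.Perm.append_left _ hperm).trans (List.filter_append_perm _ R)

-- the filtered groups of R, flattened, permute the directly filtered R
lemma filtered_groups_perm {κ α : Type} [BEq κ] [LawfulBEq κ]
    (R : List α) (key : α → κ) (P : κ → Bool) :
    (((PySem.Set.ofList (R.map key)).filter P).flatMap
        (fun c => (R.filter (fun i => key i == c)))).Perm
      (R.filter (fun i => P (key i))) := by
  have hrw : ((PySem.Set.ofList (R.map key)).filter P).flatMap
        (fun c => (R.filter (fun i => key i == c))) =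
      ((PySem.Set.ofList (R.map key)).filter P).flatMap
        (fun c => ((R.filter (fun i => P (key i))).filter (fun i => key i == c))) := by
    apply flatMap_congr_mem
    intro c hc
    have hPc : P c = true := (List.mem_filter.mp hc).2
    rw [List.filter_filter]
    apply List.filter_congr
    intro i _
    by_cases h : key i = c <;> simp [h, hPc]
  rw [hrw]
  apply flatMap_groups_perm
  · exact (PySem.Set.nodup_ofList _).filter _
  · intro i hi
    refine List.mem_filter.mpr ⟨(PySem.Set.mem_ofList _ _).mpr (List.mem_map_of_mem (List.mem_of_mem_filter hi)), ?_⟩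
    simpa using (List.of_mem_filter hi)

-- characterisation of A's grouping dict
lemma findAllPattern_eq (string : String) (k : Int) :
    let R := PySem.List.pyRange 0 (PySem.Str.len string - k + 1) 1
    let w := fun i => PySem.Str.slice string (some i) (some (i + k))
    (findAllPattern string k).items =
      (PySem.Set.ofList (R.map w)).map (fun c => (c, R.filter (fun i => w i == c))) := by
  intro R w
  unfold findAllPattern
  have hfold : R.foldl
      (fun dic i => dic.modify (w i) [] (fun val => val ++ [i])) PySem.Dict.empty =
      (R.map (fun i => (w i, i))).foldl
      (fun dic p => dic.modify p.1 [] (fun x => x ++ [p.2])) PySem.Dict.empty := by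
    rw [List.foldl_map]
  rw [hfold]
  have hkeys : ((R.map (fun i => (w i, i))).foldl
      (fun dic p => dic.modify p.1 [] (fun x => x ++ [p.2])) PySem.Dict.empty).keys =
      PySem.Set.ofList (R.map w) := by
    have := PySem.Dict.keys_foldl_modify_key (R.map (fun i => (w i, i)))
      (fun p => p.1) ([] : List Int) (fun _ p => fun x => x ++ [p.2]) PySem.Dict.empty
    simpa [PySem.Dict.keys_empty, PySem.Set.update, PySem.Set.ofList, List.map_map,
      Function.comp] using this
  rw [PySem.Dict.items_eq_map_keys _ (by rw [hkeys]; exact PySem.Set.nodup_ofList _) []]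
  rw [hkeys]
  apply List.map_congr_left
  intro c _
  rw [PySem.Dict.getD_foldl_modify_append]
  simp [PySem.Dict.getD_empty, List.filter_map, List.map_map, Function.comp_def]

-- ===== VERDICT (by name: the statement is the Claim_ definition above) =====
theorem mainFunc_spec : Claim_equal_mainFunc := by
  intro pattern string d _
  unfold Spec_mainFunc mainFunc mainFunc_alt
  simp only [PySem.Str.len_eq, String.length_toList]
  have hitems := findAllPattern_eq string (((pattern.length : Int)))
  simp only [PySem.Str.len_eq, String.length_toList] at hitems
  rw [hitems]
  rw [List.filter_map, List.map_map, PySem.List.foldl_append_eq_flatten, List.nil_append,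
    ← List.flatMap_def]
  have hperm := filtered_groups_perm
    (PySem.List.pyRange 0 (((string.length : Int)) - ((pattern.length : Int)) + 1) 1)
    (fun i => PySem.Str.slice string (some i) (some (i + ((pattern.length : Int)))))
    (fun c => decide (hammingDistance c pattern ≤ d))
  have hpw : ((PySem.List.pyRange 0 (((string.length : Int)) - ((pattern.length : Int)) + 1) 1).filter
      (fun i => decide (hammingDistance (PySem.Str.slice string (some i) (some (i + ((pattern.length : Int))))) pattern ≤ d))).Pairwise
      (fun a b => a < b) :=
    List.Pairwise.filter _ (PySem.List.pairwise_lt_pyRange_one 0 (((string.length : Int)) - ((pattern.length : Int)) + 1))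
  have hsorted := PySem.List.sorted_eq_of_perm_of_pairwise_lt _
    ((PySem.List.pyRange 0 (((string.length : Int)) - ((pattern.length : Int)) + 1) 1).filter
      (fun i => decide (hammingDistance (PySem.Str.slice string (some i) (some (i + ((pattern.length : Int))))) pattern ≤ d)))
    (fun (x : Int) => x) (by simpa [Function.comp_def] using hperm.symm) hpw
  simp only [Function.comp_def] at hsorted ⊢
  rw [hsorted]
  rw [PySem.List.foldl_append_ite
    (fun i => mismatchCount (PySem.Str.slice string (some i) (some (i + ((pattern.length : Int))))) pattern ≤ d)
    (fun i => PySem.Int.toStr i) _ []]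
  rw [List.nil_append]
  have heta : (fun i => PySem.Int.toStr i) = PySem.Int.toStr := rfl
  rw [heta]
  congr 1
  congr 1
  apply List.filter_congr
  intro i _
  simp [ham_eq_mism]
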